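-- pv_equiv track=rewrite | github.com/Jungkihong07/codingTest | Challenge_1/day6/2504.py | solve
-- ===== SOURCE A (Python) =====
-- def solve(s_list):
--     q = []
--     for c in s_list:
--         if c in ["(", "["]:
--             q.append(c)
--         else:
--             temp = 0
--             while q:
--                 top = q.pop()
--                 if isinstance(top, int):
--                     temp += top
--                 elif c == "]" and top == "[":
--                     q.append(3 if temp == 0 else temp * 3)
--                     break
--                 elif c == ")" and top == "(":
--                     q.append(2 if temp == 0 else temp * 2)
--                     break
--                 else:
--                     return 0
--             else:
--                 return 0
--     result = 0
--     for item in q: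
--         if isinstance(item, str):
--             return 0
--         else:
--             result += item
--     return result
-- ===== SOURCE B (Python) =====
-- def solve(s_list):
--     st = []
--     result = 0
--     temp = 1
--     prev = None
--     for c in s_list:
--         if c == "(":
--             st.append(c)
--             temp *= 2
--         elif c == "[":
--             st.append(c)
--             temp *= 3
--         elif c == ")":
--             if not st or st[-1] != "(":
--                 return 0
--             if prev == "(":
--                 result += temp
--             st.pop()
--             temp //= 2
--         elif c == "]":
--             if not st or st[-1] != "[":
--                 return 0
--             if prev == "[":
--                 result += temp
--             st.pop()
--             temp //= 3
--         else:
--             return 0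
--         prev = c
--     return 0 if st else result
-- ===== Notes on version B (the rewrite author's own statement) =====
-- stated objective: alternative
-- what changed: Replaces A's mixed int/string value stack with an inner popping loop per closing bracket by a single pass that keeps only a bracket stack, a running multiplier temp and a result accumulator, detecting innermost pairs via the previous character.
import Mathlib
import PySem

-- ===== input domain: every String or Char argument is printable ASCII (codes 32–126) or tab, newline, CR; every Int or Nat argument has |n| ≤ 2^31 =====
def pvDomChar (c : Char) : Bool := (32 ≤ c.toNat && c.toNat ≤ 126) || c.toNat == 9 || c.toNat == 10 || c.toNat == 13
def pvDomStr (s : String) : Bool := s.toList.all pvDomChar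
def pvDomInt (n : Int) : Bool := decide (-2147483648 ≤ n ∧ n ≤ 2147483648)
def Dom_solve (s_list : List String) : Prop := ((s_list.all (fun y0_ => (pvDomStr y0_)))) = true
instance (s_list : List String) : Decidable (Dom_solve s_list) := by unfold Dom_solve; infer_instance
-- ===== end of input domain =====

-- B replaces A's mixed int/string value stack (with its inner popping loop) by a single pass
-- keeping a bracket stack, a running multiplier and a result accumulator (objective: alternative).


-- ===== PORT A =====
-- A keeps a Python list holding both ints and strings: Int ⊕ String (inl = int, inr = bracket char).
-- innerA is A's `while q:` loop: c is the current char, temp the running sum, q the stack (head = top).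
def innerA (c : String) (temp : Int) (q : List (Int ⊕ String)) : Option (List (Int ⊕ String)) :=
  match q with
  | [] => none                                -- while-else: return 0
  | top :: rest =>
    match top with
    | Sum.inl n => innerA c (temp + n) rest
    | Sum.inr s =>
      if c = "]" ∧ s = "[" then some (Sum.inl (if temp = 0 then 3 else temp * 3) :: rest)
      else if c = ")" ∧ s = "(" then some (Sum.inl (if temp = 0 then 2 else temp * 2) :: rest)
      else none                               -- return 0

-- A's final `for item in q:` loop (bottom-first, hence the reverse at the call site)
def finalA : List (Int ⊕ String) → Int → Int
  | [], r => r
  | Sum.inr _ :: _, _ => 0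
  | Sum.inl n :: t, r => finalA t (r + n)

def goA : List String → List (Int ⊕ String) → Int
  | [], q => finalA q.reverse 0
  | c :: rest, q =>
    if c = "(" ∨ c = "[" then goA rest (Sum.inr c :: q)
    else
      match innerA c 0 q with
      | none => 0
      | some q' => goA rest q'

def solve (s_list : List String) : Int := goA s_list []

-- ===== PORT B =====
-- state: prev = previously processed char, st = bracket stack (head = top), result, temp
def goB : List String → Option String → List String → Int → Int → Int
  | [], _, st, result, _ => if st = [] then result else 0
  | c :: rest, prev, st, result, temp =>
    if c = "(" then goB rest (some c) (c :: st) result (temp * 2)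
    else if c = "[" then goB rest (some c) (c :: st) result (temp * 3)
    else if c = ")" then
      match st with
      | [] => 0
      | t :: st' =>
        if t ≠ "(" then 0
        else goB rest (some c) st' (if prev = some "(" then result + temp else result)
               (PySem.Int.floordiv temp 2)
    else if c = "]" then
      match st with
      | [] => 0
      | t :: st' =>
        if t ≠ "[" then 0
        else goB rest (some c) st' (if prev = some "[" then result + temp else result)
               (PySem.Int.floordiv temp 3)
    else 0

def solve_alt (s_list : List String) : Int := goB s_list none [] 0 1

-- ===== PRECONDITION & SPEC =====
def Spec_solve (s_list : List String) (out : Int) : Prop := out = solve_alt s_list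
instance (s_list : List String) (out : Int) : Decidable (Spec_solve s_list out) := by unfold Spec_solve; infer_instance

-- ===== CLAIM (what is proved, stated in full; the proofs are below) =====
def Claim_equal_solve : Prop := ∀ (s_list : List String), Dom_solve s_list → Spec_solve s_list (solve s_list)

-- ===== LEMMAS AND PROOFS =====

-- bracket value
def bv (s : String) : Int := if s = "(" then 2 else 3

-- the bracket characters on A's stack, top first
def opensOf : List (Int ⊕ String) → List String :=
  List.filterMap (fun e => match e with | Sum.inr s => some s | Sum.inl _ => none)

def prodV (st : List String) : Int := (st.map bv).prod

-- sum of the int entries of A's stack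
def sumL (q : List (Int ⊕ String)) : Int :=
  (q.map (fun e => match e with | Sum.inl n => n | Sum.inr _ => 0)).sum

-- B's accumulated result, read off A's stack: each int weighted by the opens below it
def absS : List (Int ⊕ String) → Int
  | [] => 0
  | Sum.inl n :: t => n * prodV (opensOf t) + absS t
  | Sum.inr _ :: t => absS t

def elemOK : (Int ⊕ String) → Prop
  | Sum.inl n => 2 ≤ n
  | Sum.inr s => s = "(" ∨ s = "["

def PrevLink : List (Int ⊕ String) → Option String → Prop
  | [], _ => True
  | Sum.inr o :: _, prev => prev = some o
  | Sum.inl _ :: _, prev => prev = some ")" ∨ prev = some "]"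

def StInv (q : List (Int ⊕ String)) (prev : Option String) (st : List String)
    (result temp : Int) : Prop :=
  st = opensOf q ∧ temp = prodV st ∧ result = absS q ∧ (∀ e ∈ q, elemOK e) ∧ PrevLink q prev

theorem opensOf_inr (o : String) (q : List (Int ⊕ String)) :
    opensOf (Sum.inr o :: q) = o :: opensOf q := rfl
theorem opensOf_inl (n : Int) (q : List (Int ⊕ String)) :
    opensOf (Sum.inl n :: q) = opensOf q := rfl

theorem opensOf_allL (q : List (Int ⊕ String)) (h : ∀ e ∈ q, e.isLeft) : opensOf q = [] := by
  induction q with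
  | nil => rfl
  | cons e t ih =>
    cases e with
    | inl n => exact (opensOf_inl n t).trans (ih fun x hx => h x (List.mem_cons_of_mem _ hx))
    | inr s => exact absurd (h (Sum.inr s) List.mem_cons_self) (by simp)

theorem opensOf_append (l1 l2 : List (Int ⊕ String)) :
    opensOf (l1 ++ l2) = opensOf l1 ++ opensOf l2 := by
  simp [opensOf]

-- decomposition of A's stack: all ints, or a run of ints on top of the first open
theorem decomp (q : List (Int ⊕ String)) :
    (∀ e ∈ q, e.isLeft) ∨
    ∃ run o q', q = run ++ Sum.inr o :: q' ∧ (∀ e ∈ run, e.isLeft) ∧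
      opensOf q = o :: opensOf q' := by
  induction q with
  | nil => exact Or.inl (by simp)
  | cons e t ih =>
    cases e with
    | inr s =>
      exact Or.inr ⟨[], s, t, by simp, by simp, by simp [opensOf_inr]⟩
    | inl n =>
      rcases ih with h | ⟨run, o, q', heq, hrun, hop⟩
      · exact Or.inl (by simpa using h)
      · refine Or.inr ⟨Sum.inl n :: run, o, q', by simp [heq], ?_, ?_⟩
        · intro x hx; rcases List.mem_cons.1 hx with rfl | hx; · simp
          exact hrun x hx
        · simpa [opensOf_inl] using hop

theorem innerA_run (c : String) (temp : Int) (run rest : List (Int ⊕ String))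
    (h : ∀ e ∈ run, e.isLeft) :
    innerA c temp (run ++ rest) = innerA c (temp + sumL run) rest := by
  induction run generalizing temp with
  | nil => simp [sumL]
  | cons e t ih =>
    cases e with
    | inr s => exact absurd (h (Sum.inr s) List.mem_cons_self) (by simp)
    | inl n =>
      have := ih (temp + n) (fun x hx => h x (List.mem_cons_of_mem _ hx))
      simpa [innerA, sumL, add_assoc] using this

theorem sumL_nonneg (run : List (Int ⊕ String)) (h : ∀ e ∈ run, elemOK e)
    (hl : ∀ e ∈ run, e.isLeft) : (run = [] → sumL run = 0) ∧ (run ≠ [] → 0 < sumL run) := by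
  induction run with
  | nil => simp [sumL]
  | cons e t ih =>
    refine ⟨by simp, fun _ => ?_⟩
    have ht := ih (fun x hx => h x (List.mem_cons_of_mem _ hx))
      (fun x hx => hl x (List.mem_cons_of_mem _ hx))
    have htn : 0 ≤ sumL t := by
      by_cases hte : t = []
      · simp [hte, sumL]
      · exact le_of_lt (ht.2 hte)
    cases e with
    | inr s => exact absurd (hl (Sum.inr s) List.mem_cons_self) (by simp)
    | inl n =>
      have hn : 2 ≤ n := h (Sum.inl n) List.mem_cons_self
      have : sumL (Sum.inl n :: t) = n + sumL t := by simp [sumL]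
      omega

theorem absS_run (run rest : List (Int ⊕ String)) (h : ∀ e ∈ run, e.isLeft) :
    absS (run ++ rest) = sumL run * prodV (opensOf rest) + absS rest := by
  induction run with
  | nil => simp [sumL]
  | cons e t ih =>
    cases e with
    | inr s => exact absurd (h (Sum.inr s) List.mem_cons_self) (by simp)
    | inl n =>
      have ht := ih (fun x hx => h x (List.mem_cons_of_mem _ hx))
      have hop : opensOf (t ++ rest) = opensOf rest := by
        rw [opensOf_append, opensOf_allL t (fun x hx => h x (List.mem_cons_of_mem _ hx))]
        simp
      have hs : sumL (Sum.inl n :: t) = n + sumL t := by simp [sumL]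
      calc absS (Sum.inl n :: (t ++ rest))
          = n * prodV (opensOf (t ++ rest)) + absS (t ++ rest) := rfl
        _ = n * prodV (opensOf rest) + (sumL t * prodV (opensOf rest) + absS rest) := by
            rw [hop, ht]
        _ = sumL (Sum.inl n :: t) * prodV (opensOf rest) + absS rest := by rw [hs]; ring

theorem absS_allL (q : List (Int ⊕ String)) (h : ∀ e ∈ q, e.isLeft) : absS q = sumL q := by
  have := absS_run q [] h
  simpa [absS, sumL, prodV, opensOf] using this

theorem finalA_allL (l : List (Int ⊕ String)) (r : Int) (h : ∀ e ∈ l, e.isLeft) :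
    finalA l r = r + sumL l := by
  induction l generalizing r with
  | nil => simp [finalA, sumL]
  | cons e t ih =>
    cases e with
    | inr s => exact absurd (h (Sum.inr s) List.mem_cons_self) (by simp)
    | inl n =>
      have := ih (r + n) (fun x hx => h x (List.mem_cons_of_mem _ hx))
      have hs : sumL (Sum.inl n :: t) = n + sumL t := by simp [sumL]
      simp [finalA, this, hs]; ring

theorem finalA_hasR (l : List (Int ⊕ String)) (r : Int)
    (h : ∃ e ∈ l, e.isRight) : finalA l r = 0 := by
  induction l generalizing r with
  | nil => simp at h
  | cons e t ih =>
    cases e with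
    | inr s => simp [finalA]
    | inl n =>
      rcases h with ⟨x, hx, hxr⟩
      rcases List.mem_cons.1 hx with rfl | hx
      · simp at hxr
      · exact ih (r + n) ⟨x, hx, hxr⟩

theorem floordiv_mul_left (m k : Int) (hk : k ≠ 0) : PySem.Int.floordiv (k * m) k = m := by
  simp [PySem.Int.floordiv, Int.mul_fdiv_cancel_left m hk]

-- the main simulation lemma
theorem mainLemma (rest : List String) :
    ∀ q prev st result temp, StInv q prev st result temp →
      goA rest q = goB rest prev st result temp := by
  induction rest with
  | nil =>
    intro q prev st result temp ⟨hst, htemp, hres, hok, hprev⟩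
    by_cases hop : opensOf q = []
    · have hallL : ∀ e ∈ q, e.isLeft := by
        intro e he
        cases e with
        | inl n => simp
        | inr s =>
          exfalso
          have : s ∈ opensOf q := List.mem_filterMap.2 ⟨Sum.inr s, he, rfl⟩
          simp [hop] at this
      have h1 : goA [] q = sumL q := by
        have : ∀ e ∈ q.reverse, e.isLeft := fun e he => hallL e (List.mem_reverse.1 he)
        simp [goA, finalA_allL _ _ this, sumL]
      rw [h1]
      have : goB [] prev st result temp = result := by
        simp [goB, hst, hop]
      rw [this, hres, absS_allL q hallL]
    · rcases decomp q with hallL | ⟨run, o, q', heq, hrun, hopq⟩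
      · exact absurd (opensOf_allL q hallL) hop
      · have hr : ∃ e ∈ q.reverse, e.isRight := by
          refine ⟨Sum.inr o, ?_, by simp⟩
          rw [List.mem_reverse, heq]; simp
        have h1 : goA [] q = 0 := by simp [goA, finalA_hasR _ _ hr]
        have h2 : goB [] prev st result temp = 0 := by
          simp [goB, hst, hopq]
        rw [h1, h2]
  | cons c rest ih =>
    intro q prev st result temp ⟨hst, htemp, hres, hok, hprev⟩
    by_cases hcp : c = "("
    · subst hcp
      have hA : goA ("(" :: rest) q = goA rest (Sum.inr "(" :: q) := by
        simp [goA]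
      have hB : goB ("(" :: rest) prev st result temp
          = goB rest (some "(") ("(" :: st) result (temp * 2) := by simp [goB]
      rw [hA, hB]
      apply ih
      refine ⟨by rw [hst, opensOf_inr], ?_, by simpa [absS] using hres, ?_, by simp [PrevLink]⟩
      · rw [htemp]; simp [prodV, bv]; ring
      · intro e he
        rcases List.mem_cons.1 he with rfl | he
        · simp [elemOK]
        · exact hok e he
    · by_cases hcb : c = "["
      · subst hcb
        have hA : goA ("[" :: rest) q = goA rest (Sum.inr "[" :: q) := by
          simp [goA]
        have hB : goB ("[" :: rest) prev st result temp
            = goB rest (some "[") ("[" :: st) result (temp * 3) := by simp [goB, hcp]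
        rw [hA, hB]
        apply ih
        refine ⟨by rw [hst, opensOf_inr], ?_, by simpa [absS] using hres, ?_, by simp [PrevLink]⟩
        · rw [htemp]; simp [prodV, bv]; ring
        · intro e he
          rcases List.mem_cons.1 he with rfl | he
          · simp [elemOK]
          · exact hok e he
      · -- c is a closer or junk: A runs innerA
        have hAopen : ¬ (c = "(" ∨ c = "[") := by tauto
        rcases decomp q with hallL | ⟨run, o, q', heq, hrun, hopq⟩
        · -- no open bracket on the stack: A's inner loop exhausts and fails
          have hinner : innerA c 0 q = none := by
            have := innerA_run c 0 q [] hallL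
            simpa [innerA] using this
          have hA : goA (c :: rest) q = 0 := by
            simp [goA, hAopen, hinner]
          have hstn : st = [] := by rw [hst, opensOf_allL q hallL]
          rw [hA]
          by_cases hc1 : c = ")"
          · simp [goB, hc1, hcp, hcb, hstn]
          · by_cases hc2 : c = "]"
            · simp [goB, hc2, hcp, hcb, hc1, hstn]
            · simp [goB, hcp, hcb, hc1, hc2]
        · -- q = run ++ inr o :: q'
          have hsum := innerA_run c 0 (run) (Sum.inr o :: q') hrun
          have hoOK : o = "(" ∨ o = "[" := by
            have := hok (Sum.inr o) (by rw [heq]; simp)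
            simpa [elemOK] using this
          have hrunOK : ∀ e ∈ run, elemOK e := fun e he => hok e (by rw [heq]; simp [he])
          have hsl := sumL_nonneg run hrunOK hrun
          by_cases hc1 : c = ")"
          · subst hc1
            cases hoOK with
            | inl ho =>
              -- o = "(" : the matching case
              subst ho
              have hinner : innerA ")" 0 q
                  = some (Sum.inl (if sumL run = 0 then 2 else sumL run * 2) :: q') := by
                rw [heq, hsum]; simp [innerA]
              have hA : goA (")" :: rest) q
                  = goA rest (Sum.inl (if sumL run = 0 then 2 else sumL run * 2) :: q') := by
                simp [goA, hAopen, hinner]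
              have hB : goB (")" :: rest) prev st result temp
                  = goB rest (some ")") (opensOf q')
                      (if prev = some "(" then result + temp else result)
                      (PySem.Int.floordiv temp 2) := by
                rw [hst, hopq]; simp [goB, hcp, hcb]
              rw [hA, hB]
              have htempval : temp = 2 * prodV (opensOf q') := by
                rw [htemp, hst, hopq]; simp [prodV, bv]
              have hfd : PySem.Int.floordiv temp 2 = prodV (opensOf q') := by
                rw [htempval]; exact floordiv_mul_left _ 2 (by norm_num)
              apply ih
              refine ⟨by rw [opensOf_inl], by rw [hfd], ?_, ?_, by simp [PrevLink]⟩
              · -- result component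
                by_cases hrn : run = []
                · -- empty run: prev = some "(" and A pushes the base value 2
                  have hprev' : prev = some "(" := by
                    rw [heq, hrn] at hprev; simpa [PrevLink] using hprev
                  have hs0 : sumL run = 0 := hsl.1 hrn
                  have habs : absS q = absS q' := by
                    rw [heq, hrn]; simp [absS]
                  rw [if_pos hprev', if_pos hs0, hres, habs, htempval]
                  simp [absS]; ring
                · -- nonempty run: prev is a closer, A multiplies the collected sum
                  have hs0 : sumL run ≠ 0 := by have := hsl.2 hrn; omega
                  have hprev' : prev ≠ some "(" := by
                    rcases run with _ | ⟨e, t⟩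
                    · exact absurd rfl hrn
                    · cases e with
                      | inr s => exact absurd (hrun (Sum.inr s) List.mem_cons_self) (by simp)
                      | inl n =>
                        rw [heq] at hprev
                        rcases hprev with h | h <;> simp [h]
                  rw [if_neg hprev', if_neg hs0, hres, heq, absS_run run _ hrun]
                  simp [absS, opensOf_inr, prodV, bv]
                  ring
              · intro e he
                rcases List.mem_cons.1 he with rfl | he
                · by_cases hrn : run = []
                  · simp [hsl.1 hrn, elemOK]
                  · have := hsl.2 hrn
                    have : sumL run ≠ 0 := by omega
                    simp [this, elemOK]
                    have := hsl.2 hrn; omega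
                · exact hok e (by rw [heq]; simp [he])
            | inr ho =>
              -- o = "[" with c = ")": mismatch, both fail
              subst ho
              have hinner : innerA ")" 0 q = none := by
                rw [heq, hsum]; simp [innerA]
              have hA : goA (")" :: rest) q = 0 := by simp [goA, hAopen, hinner]
              have hB : goB (")" :: rest) prev st result temp = 0 := by
                rw [hst, hopq]; simp [goB, hcp, hcb]
              rw [hA, hB]
          · by_cases hc2 : c = "]"
            · subst hc2
              cases hoOK with
              | inr ho =>
                subst ho
                have hinner : innerA "]" 0 q
                    = some (Sum.inl (if sumL run = 0 then 3 else sumL run * 3) :: q') := by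
                  rw [heq, hsum]; simp [innerA]
                have hA : goA ("]" :: rest) q
                    = goA rest (Sum.inl (if sumL run = 0 then 3 else sumL run * 3) :: q') := by
                  simp [goA, hAopen, hinner]
                have hB : goB ("]" :: rest) prev st result temp
                    = goB rest (some "]") (opensOf q')
                        (if prev = some "[" then result + temp else result)
                        (PySem.Int.floordiv temp 3) := by
                  rw [hst, hopq]; simp [goB, hcp, hcb]
                rw [hA, hB]
                have htempval : temp = 3 * prodV (opensOf q') := by
                  rw [htemp, hst, hopq]; simp [prodV, bv]
                have hfd : PySem.Int.floordiv temp 3 = prodV (opensOf q') := by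
                  rw [htempval]; exact floordiv_mul_left _ 3 (by norm_num)
                apply ih
                refine ⟨by rw [opensOf_inl], by rw [hfd], ?_, ?_, by simp [PrevLink]⟩
                · by_cases hrn : run = []
                  · have hprev' : prev = some "[" := by
                      rw [heq, hrn] at hprev; simpa [PrevLink] using hprev
                    have hs0 : sumL run = 0 := hsl.1 hrn
                    have habs : absS q = absS q' := by
                      rw [heq, hrn]; simp [absS]
                    rw [if_pos hprev', if_pos hs0, hres, habs, htempval]
                    simp [absS]; ring
                  · have hs0 : sumL run ≠ 0 := by have := hsl.2 hrn; omega
                    have hprev' : prev ≠ some "[" := by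
                      rcases run with _ | ⟨e, t⟩
                      · exact absurd rfl hrn
                      · cases e with
                        | inr s => exact absurd (hrun (Sum.inr s) List.mem_cons_self) (by simp)
                        | inl n =>
                          rw [heq] at hprev
                          rcases hprev with h | h <;> simp [h]
                    rw [if_neg hprev', if_neg hs0, hres, heq, absS_run run _ hrun]
                    simp [absS, opensOf_inr, prodV, bv]
                    ring
                · intro e he
                  rcases List.mem_cons.1 he with rfl | he
                  · by_cases hrn : run = []
                    · simp [hsl.1 hrn, elemOK]
                    · have := hsl.2 hrn
                      have : sumL run ≠ 0 := by omega
                      simp [this, elemOK]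
                      have := hsl.2 hrn; omega
                  · exact hok e (by rw [heq]; simp [he])
              | inl ho =>
                subst ho
                have hinner : innerA "]" 0 q = none := by
                  rw [heq, hsum]; simp [innerA]
                have hA : goA ("]" :: rest) q = 0 := by simp [goA, hAopen, hinner]
                have hB : goB ("]" :: rest) prev st result temp = 0 := by
                  rw [hst, hopq]; simp [goB, hcp, hcb]
                rw [hA, hB]
            · -- junk character: both fail
              have hinner : innerA c 0 q = none := by
                rw [heq, hsum]; simp [innerA, hc1, hc2]
              have hA : goA (c :: rest) q = 0 := by simp [goA, hAopen, hinner]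
              have hB : goB (c :: rest) prev st result temp = 0 := by
                simp [goB, hcp, hcb, hc1, hc2]
              rw [hA, hB]

-- ===== VERDICT (by name: the statement is the Claim_ definition above) =====
theorem solve_spec : Claim_equal_solve := by
  intro s_list _
  unfold Spec_solve solve solve_alt
  exact mainLemma s_list [] none [] 0 1
    ⟨rfl, rfl, rfl, by simp, trivial⟩
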